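-- pv_equiv track=rewrite | github.com/linhxm/SorcererXStreme-AI | src/chatbot/lambda_function.py | calculate_numerology
-- ===== SOURCE A (Python) =====
-- def calculate_numerology(d: int, m: int, y: int) -> str:
--     def sum_digits(n):
--         s = sum(int(digit) for digit in str(n))
--         if s == 11 or s == 22 or s == 33: return s
--         return s if s < 10 else sum_digits(s)
--     total = sum_digits(d) + sum_digits(m) + sum_digits(y)
--     lp = sum_digits(total)
--     if lp == 4 and total == 22: lp = 22
--     return str(lp)
-- ===== SOURCE B (Python) =====
-- def calculate_numerology(d: int, m: int, y: int) -> str: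
--     # Different decomposition: digit sums are computed arithmetically with divmod
--     # (no string conversion), and the reduction to a life-path value is a fully
--     # unrolled bounded fold instead of a recursive loop: for inputs of at most
--     # 11 digits the first digit sum is below 100, so at most two further
--     # two-digit folds (s // 10 + s % 10) reach a single digit or a master number.
--     def digit_sum(n):
--         s = 0
--         while n > 0:
--             n, r = divmod(n, 10)
--             s += r
--         return s
--     def reduce(n):
--         s = digit_sum(n)
--         if s < 10 or s in (11, 22, 33):
--             return s
--         t = s // 10 + s % 10
--         if t < 10 or t in (11, 22, 33):
--             return t
--         return t // 10 + t % 10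
--     total = reduce(d) + reduce(m) + reduce(y)
--     lp = reduce(total)
--     if lp == 4 and total == 22:
--         lp = 22
--     return str(lp)
-- ===== Notes on version B (the rewrite author's own statement) =====
-- stated objective: alternative
-- what changed: A's recursive string-based digit reduction (str(n), per-character int(), recursive sum_digits) is replaced by an arithmetic divmod digit sum plus a fully unrolled bounded reduction: since the digit sum of an input with at most 11 digits is below 100, at most two further two-digit folds s//10+s%10 suffice, so the reduction has no loop or recursion at all.
import Mathlib
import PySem

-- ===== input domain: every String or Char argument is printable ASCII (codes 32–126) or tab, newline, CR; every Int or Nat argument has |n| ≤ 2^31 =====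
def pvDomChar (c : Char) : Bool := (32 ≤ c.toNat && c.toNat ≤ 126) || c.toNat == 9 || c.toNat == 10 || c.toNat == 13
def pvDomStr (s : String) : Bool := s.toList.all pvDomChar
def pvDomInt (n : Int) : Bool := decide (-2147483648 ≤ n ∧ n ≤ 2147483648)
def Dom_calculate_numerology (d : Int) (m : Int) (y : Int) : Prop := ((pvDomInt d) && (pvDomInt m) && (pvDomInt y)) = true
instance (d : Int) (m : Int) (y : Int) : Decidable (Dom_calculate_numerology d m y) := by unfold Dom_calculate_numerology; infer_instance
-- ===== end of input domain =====

-- B replaces A's recursive string-based digit reduction by an arithmetic divmod digit sum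
-- plus a fully unrolled bounded reduction (at most two two-digit folds, no loop/recursion).

-- ===== PORT A =====
-- `sum(int(digit) for digit in str(n))`; `int('-')` raises ValueError (possible only for
-- n < 0, excluded by Pre_), so the `.getD 0` default is never observed on admitted inputs.
def pvDigitSumStrA (n : Int) : Int :=
  ((PySem.Int.toChars n).map (fun c => (PySem.Int.ofChars? [c]).getD 0)).sum

-- A's recursive `sum_digits`, with a fuel guard for totality only: the chain of digit
-- sums strictly decreases, so fuel `n.toNat + 1` is never exhausted for n ≥ 0.
def pvSumDigitsA (fuel : Nat) (n : Int) : Int :=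
  match fuel with
  | 0 => 0
  | f + 1 =>
    let s := pvDigitSumStrA n
    if s = 11 ∨ s = 22 ∨ s = 33 then s
    else if s < 10 then s else pvSumDigitsA f s

def calculate_numerology (d : Int) (m : Int) (y : Int) : String :=
  let total := pvSumDigitsA (d.toNat + 1) d + pvSumDigitsA (m.toNat + 1) m
               + pvSumDigitsA (y.toNat + 1) y
  let lp := pvSumDigitsA (total.toNat + 1) total
  let lp := if lp = 4 ∧ total = 22 then 22 else lp
  PySem.Int.toStr lp

-- ===== PORT B =====
-- inner `while n > 0: n, r = divmod(n, 10); s += r`, as structural recursion on the value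
def pvDigitSumB (n : Int) : Int :=
  if 0 < n then PySem.Int.mod n 10 + pvDigitSumB (PySem.Int.floordiv n 10) else 0
termination_by n.toNat
decreasing_by
  simp only [PySem.Int.floordiv]
  have h1 : n.fdiv 10 = n / 10 := Int.fdiv_eq_ediv_of_nonneg _ (by norm_num)
  omega

-- Source B's `reduce`: the unrolled bounded fold (no recursion)
def pvReduceB (n : Int) : Int :=
  let s := pvDigitSumB n
  if s < 10 ∨ s = 11 ∨ s = 22 ∨ s = 33 then s
  else
    let t := PySem.Int.floordiv s 10 + PySem.Int.mod s 10
    if t < 10 ∨ t = 11 ∨ t = 22 ∨ t = 33 then t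
    else PySem.Int.floordiv t 10 + PySem.Int.mod t 10

def calculate_numerology_alt (d : Int) (m : Int) (y : Int) : String :=
  let total := pvReduceB d + pvReduceB m + pvReduceB y
  let lp := pvReduceB total
  let lp := if lp = 4 ∧ total = 22 then 22 else lp
  PySem.Int.toStr lp

-- ===== PRECONDITION & SPEC =====
-- Pre_ excludes negative components: there Python A raises ValueError (int('-') on the sign
-- character of str(n)), so A returns on exactly the inputs admitted here.
def Pre_calculate_numerology (d : Int) (m : Int) (y : Int) : Prop := 0 ≤ d ∧ 0 ≤ m ∧ 0 ≤ y
instance (d : Int) (m : Int) (y : Int) : Decidable (Pre_calculate_numerology d m y) := by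
  unfold Pre_calculate_numerology; infer_instance

def pvWitness_calculate_numerology : Int × Int × Int := (29, 12, 1984)

def Spec_calculate_numerology (d : Int) (m : Int) (y : Int) (out : String) : Prop :=
  out = calculate_numerology_alt d m y
instance (d : Int) (m : Int) (y : Int) (out : String) : Decidable (Spec_calculate_numerology d m y out) := by
  unfold Spec_calculate_numerology; infer_instance

-- ===== CLAIM (what is proved, stated in full; the proofs are below) =====
def Claim_equal_calculate_numerology : Prop :=
  ∀ (d : Int) (m : Int) (y : Int), Dom_calculate_numerology d m y →
    Pre_calculate_numerology d m y →
    Spec_calculate_numerology d m y (calculate_numerology d m y)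

-- ===== LEMMAS AND PROOFS =====

-- proof-side arithmetic digit sum over Nat
def pvG (m : Nat) : Int :=
  if m = 0 then 0 else (m % 10 : Int) + pvG (m / 10)

-- proof-side shape of `Nat.toDigitsCore 10 _ m []`
def pvRep (m : Nat) : List Char :=
  if m / 10 = 0 then [Nat.digitChar (m % 10)]
  else pvRep (m / 10) ++ [Nat.digitChar (m % 10)]
decreasing_by exact Nat.div_lt_self (by omega) (by norm_num)

theorem pvToDigitsCore_eq (f : Nat) : ∀ (n : Nat) (acc : List Char), n < f →
    Nat.toDigitsCore 10 f n acc = pvRep n ++ acc := by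
  induction f with
  | zero => intro n acc h; omega
  | succ f ih =>
    intro n acc h
    rw [Nat.toDigitsCore, pvRep]
    by_cases h0 : n / 10 = 0
    · simp [h0]
    · simp only [h0, if_false]
      rw [ih (n / 10) _ (by omega)]
      simp

theorem pvParse_digitChar (d : Nat) (hd : d < 10) :
    (PySem.Int.ofChars? [Nat.digitChar d]).getD 0 = (d : Int) := by
  interval_cases d <;> decide

theorem pvRep_sum (m : Nat) :
    ((pvRep m).map (fun c => (PySem.Int.ofChars? [c]).getD 0)).sum = pvG m := by
  induction m using pvRep.induct with
  | case1 m h0 =>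
    rw [pvRep, pvG]
    simp only [h0, if_true, List.map_cons, List.map_nil, List.sum_cons, List.sum_nil]
    rw [pvParse_digitChar (m % 10) (Nat.mod_lt _ (by norm_num))]
    have hg0 : pvG 0 = 0 := by simp [pvG]
    by_cases hm : m = 0
    · simp [hm]
    · simp only [hm, if_false]
      rw [hg0]
      omega
  | case2 m h0 ih =>
    rw [pvRep, pvG]
    simp only [h0, if_false, List.map_append, List.sum_append]
    have hm : m ≠ 0 := by intro h; simp [h] at h0
    simp [hm, ih, pvParse_digitChar (m % 10) (Nat.mod_lt _ (by norm_num))]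
    ring

theorem pvG_nonneg (m : Nat) : 0 ≤ pvG m := by
  induction m using pvG.induct with
  | case1 => simp [pvG]
  | case2 m h ih => rw [pvG]; simp only [h, if_false]; omega

theorem pvG_le (m : Nat) : pvG m ≤ m := by
  induction m using pvG.induct with
  | case1 => simp [pvG]
  | case2 m h ih =>
    rw [pvG]; simp only [h, if_false]
    have h1 : m % 10 + m / 10 ≤ m := by omega
    omega

-- digit-sum bound from the digit count: m < 10^k → pvG m ≤ 9k
theorem pvG_pow (k : Nat) : ∀ m : Nat, m < 10 ^ k → pvG m ≤ 9 * k := by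
  induction k with
  | zero => intro m hm; interval_cases m; simp [pvG]
  | succ k ih =>
    intro m hm
    by_cases h0 : m = 0
    · simp [h0, pvG]; positivity
    · rw [pvG]; simp only [h0, if_false]
      have hdiv : m / 10 < 10 ^ k := by
        have : 10 ^ (k + 1) = 10 ^ k * 10 := pow_succ 10 k
        omega
      have := ih (m / 10) hdiv
      have : m % 10 < 10 := Nat.mod_lt _ (by norm_num)
      omega

theorem pvG_small (k : Nat) (hk : k < 10) : pvG k = k := by
  rw [pvG]
  by_cases h : k = 0
  · simp [h]
  · simp only [h, if_false]
    rw [Nat.div_eq_of_lt hk]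
    have hg0 : pvG 0 = 0 := by simp [pvG]
    rw [hg0]
    omega

-- two-digit fold: for 0 ≤ a < 100, the digit sum of a is a / 10 + a % 10
theorem pvG_two (a : Int) (h0 : 0 ≤ a) (h1 : a < 100) :
    pvG a.toNat = a / 10 + a % 10 := by
  rw [pvG]
  by_cases h : a.toNat = 0
  · simp [h]; omega
  · simp only [h, if_false]
    rw [pvG_small (a.toNat / 10) (by omega)]
    omega

-- A's string digit sum equals the proof-side arithmetic digit sum (for n ≥ 0)
theorem pvDigitSumStrA_eq (n : Int) (hn : 0 ≤ n) : pvDigitSumStrA n = pvG n.toNat := by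
  unfold pvDigitSumStrA PySem.Int.toChars
  rw [if_neg (by omega)]
  rw [Nat.toDigits, pvToDigitsCore_eq (n.toNat + 1) n.toNat [] (by omega)]
  simp [pvRep_sum]

-- floordiv/mod on nonnegative operands are ediv/emod
theorem pvFd (s : Int) (_hs : 0 ≤ s) : PySem.Int.floordiv s 10 = s / 10 := by
  simp only [PySem.Int.floordiv]
  exact Int.fdiv_eq_ediv_of_nonneg _ (by norm_num)

theorem pvFm (s : Int) (_hs : 0 ≤ s) : PySem.Int.mod s 10 = s % 10 := by
  simp only [PySem.Int.mod]
  have h1 := Int.fmod_add_mul_fdiv s 10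
  have h2 := Int.emod_add_mul_ediv s 10
  have h3 : s.fdiv 10 = s / 10 := Int.fdiv_eq_ediv_of_nonneg _ (by norm_num)
  omega

-- B's divmod digit sum equals the proof-side arithmetic digit sum (for n ≥ 0)
theorem pvDigitSumB_eq (n : Int) (hn : 0 ≤ n) : pvDigitSumB n = pvG n.toNat := by
  induction n using pvDigitSumB.induct with
  | case1 n h ih =>
    rw [pvDigitSumB]
    simp only [if_pos h]
    have h10 : (0:Int) ≤ n / 10 := Int.ediv_nonneg (by omega) (by norm_num)
    rw [pvFd n (by omega), pvFm n (by omega)] at *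
    rw [ih h10]
    have hne : n.toNat ≠ 0 := by omega
    have ht2 : (n / 10).toNat = n.toNat / 10 := by omega
    rw [ht2, show pvG n.toNat = ((n.toNat % 10 : Nat) : Int) + pvG (n.toNat / 10) from by
      rw [pvG, if_neg hne]; omega]
    omega
  | case2 n h =>
    rw [pvDigitSumB]
    have : n = 0 ∨ n < 0 := by omega
    rcases this with h0 | h0
    · simp [h0, pvG]
    · simp [h, show n.toNat = 0 by omega, pvG]

-- with fuel ≥ 3, A's recursion computes exactly B's unrolled fold (digit sum < 100)
theorem pvStep (f : Nat) (n : Int) (hf : 3 ≤ f) (hn : 0 ≤ n)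
    (h100 : pvG n.toNat < 100) : pvSumDigitsA f n = pvReduceB n := by
  obtain ⟨k, rfl⟩ : ∃ k, f = k + 1 + 1 + 1 := ⟨f - 3, by omega⟩
  have hsA : pvDigitSumStrA n = pvG n.toNat := pvDigitSumStrA_eq n hn
  have hsB : pvDigitSumB n = pvG n.toNat := pvDigitSumB_eq n hn
  rw [pvSumDigitsA, pvReduceB]
  simp only [hsA, hsB]
  set a := pvG n.toNat with ha
  have ha0 : 0 ≤ a := pvG_nonneg _
  by_cases hstop : a < 10 ∨ a = 11 ∨ a = 22 ∨ a = 33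
  · rw [if_pos hstop]
    rcases hstop with h | h | h | h
    · rw [if_neg (by omega), if_pos h]
    all_goals rw [if_pos (by omega)]
  · rw [if_neg hstop]
    push_neg at hstop
    obtain ⟨hge, hm1, hm2, hm3⟩ := hstop
    rw [if_neg (by omega), if_neg (by omega)]
    -- second level
    have hsA2 : pvDigitSumStrA a = pvG a.toNat := pvDigitSumStrA_eq a ha0
    have ht : pvG a.toNat = a / 10 + a % 10 := pvG_two a ha0 h100
    rw [pvSumDigitsA]
    simp only [hsA2, ht, pvFd a ha0, pvFm a ha0]
    set t := a / 10 + a % 10 with htdef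
    have ht0 : 0 ≤ t := by
      have := Int.emod_nonneg a (by norm_num : (10:Int) ≠ 0)
      have := Int.ediv_nonneg ha0 (by norm_num : (0:Int) ≤ 10)
      omega
    have htle : t ≤ 18 := by omega
    by_cases hstop2 : t < 10 ∨ t = 11 ∨ t = 22 ∨ t = 33
    · rw [if_pos hstop2]
      rcases hstop2 with h | h | h | h
      · rw [if_neg (by omega), if_pos h]
      all_goals rw [if_pos (by omega)]
    · rw [if_neg hstop2]
      push_neg at hstop2
      obtain ⟨hge2, _, _, _⟩ := hstop2
      rw [if_neg (by omega), if_neg (by omega)]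
      -- third level: t ∈ [10,18], so the next digit sum is single-digit
      have hsA3 : pvDigitSumStrA t = pvG t.toNat := pvDigitSumStrA_eq t ht0
      have ht3 : pvG t.toNat = t / 10 + t % 10 := pvG_two t ht0 (by omega)
      rw [pvSumDigitsA]
      simp only [hsA3, ht3, pvFd t ht0, pvFm t ht0]
      have hsm : t / 10 + t % 10 < 10 := by omega
      rw [if_neg (by omega), if_pos hsm]

-- A's sum_digits with its own fuel equals B's reduce, for 0 ≤ n with digit sum < 100
theorem pvEq (n : Int) (hn : 0 ≤ n) (h100 : pvG n.toNat < 100) :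
    pvSumDigitsA (n.toNat + 1) n = pvReduceB n := by
  by_cases hbig : 10 ≤ pvG n.toNat
  · have hle : pvG n.toNat ≤ n.toNat := pvG_le _
    exact pvStep _ n (by omega) hn h100
  · push_neg at hbig
    have hsA : pvDigitSumStrA n = pvG n.toNat := pvDigitSumStrA_eq n hn
    have hsB : pvDigitSumB n = pvG n.toNat := pvDigitSumB_eq n hn
    rw [pvSumDigitsA, pvReduceB]
    simp only [hsA, hsB]
    rw [if_neg (by omega), if_pos hbig, if_pos (Or.inl hbig)]

theorem pvReduceB_bounds (n : Int) (hn : 0 ≤ n) (h100 : pvG n.toNat < 100) :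
    0 ≤ pvReduceB n ∧ pvReduceB n ≤ 33 := by
  rw [pvReduceB]
  have hsB : pvDigitSumB n = pvG n.toNat := pvDigitSumB_eq n hn
  simp only [hsB]
  set a := pvG n.toNat with ha
  have ha0 : 0 ≤ a := pvG_nonneg _
  by_cases h1 : a < 10 ∨ a = 11 ∨ a = 22 ∨ a = 33
  · rw [if_pos h1]; omega
  · rw [if_neg h1]
    push_neg at h1
    obtain ⟨hge, _, _, _⟩ := h1
    rw [pvFd a ha0, pvFm a ha0]
    set t := a / 10 + a % 10 with htdef
    have ht : 0 ≤ t ∧ t ≤ 18 := by omega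
    by_cases h2 : t < 10 ∨ t = 11 ∨ t = 22 ∨ t = 33
    · rw [if_pos h2]; omega
    · rw [if_neg h2]
      push_neg at h2
      rw [pvFd t ht.1, pvFm t ht.1]
      omega

-- ===== VERDICT (by name: the statement is the Claim_ definition above) =====
theorem calculate_numerology_spec : Claim_equal_calculate_numerology := by
  intro d m y hdom hpre
  obtain ⟨hd, hm, hy⟩ := hpre
  simp only [Dom_calculate_numerology, pvDomInt, Bool.and_eq_true, decide_eq_true_eq] at hdom
  obtain ⟨⟨⟨_, hd2⟩, ⟨_, hm2⟩⟩, ⟨_, hy2⟩⟩ := hdom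
  have hpow : (2147483648 : Nat) < 10 ^ 10 := by norm_num
  have hGd : pvG d.toNat < 100 := by have := pvG_pow 10 d.toNat (by omega); omega
  have hGm : pvG m.toNat < 100 := by have := pvG_pow 10 m.toNat (by omega); omega
  have hGy : pvG y.toNat < 100 := by have := pvG_pow 10 y.toNat (by omega); omega
  have hbd := pvReduceB_bounds d hd hGd
  have hbm := pvReduceB_bounds m hm hGm
  have hby := pvReduceB_bounds y hy hGy
  have htot0 : 0 ≤ pvReduceB d + pvReduceB m + pvReduceB y := by omega
  have htot99 : pvReduceB d + pvReduceB m + pvReduceB y ≤ 99 := by omega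
  have hGt : pvG (pvReduceB d + pvReduceB m + pvReduceB y).toNat < 100 := by
    have := pvG_pow 2 (pvReduceB d + pvReduceB m + pvReduceB y).toNat (by omega)
    omega
  unfold Spec_calculate_numerology calculate_numerology calculate_numerology_alt
  simp only [pvEq d hd hGd, pvEq m hm hGm, pvEq y hy hGy,
    pvEq (pvReduceB d + pvReduceB m + pvReduceB y) htot0 hGt]
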